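-- pv_equiv track=rewrite | github.com/rybickibartek/sentione | split_sentence.py | solveProblemWithMoreThanOneVerb
-- ===== SOURCE A (Python) =====
-- def howManyVerbsSentenceContains(sentence):
--     # zliczanie czasowników w zdaniu
--     count = 0
--     for (word, pos) in sentence:
--         if pos == 'verb':
--             count += 1
--     return count
--
-- def cutAfterVerbs(sentence, verbsCount):
--     # cięcie kandydatów na zdania proste, którzy zawierają więcej niż jeden czasownik na zdania proste
--     sentences = [[]]
--     cuts = 0
--     for (word, pos) in sentence:
--         sentences[-1].append((word, pos))
--         if pos == 'verb' and cuts < verbsCount - 1: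
--             sentences.append([])
--             cuts += 1
--
--     if sentences[-1] == []:
--         sentences = sentences[:-1]
--     return sentences
--
-- def solveProblemWithMoreThanOneVerb(partition):
--     # wybranie zdań kandydatów, którzy mają więcej niż jeden czasownik i rozwiązanie tego problemu
--     simpleSentences = []
--     for sentence in partition:
--         verbsCount = howManyVerbsSentenceContains(sentence)
--         if verbsCount > 1:
--             simpleSentences.extend(cutAfterVerbs(sentence, verbsCount))
--         else:
--             simpleSentences.append(sentence)
--     return simpleSentences
-- ===== SOURCE B (Python) =====
-- def solveProblemWithMoreThanOneVerb(partition):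
--     simpleSentences = []
--     for sentence in partition:
--         verbs = [i for i, pair in enumerate(sentence) if pair[1] == 'verb']
--         if len(verbs) < 2:
--             simpleSentences.append(sentence)
--         else:
--             bounds = [0] + [i + 1 for i in verbs[:-1]] + [len(sentence)]
--             for a, b in zip(bounds, bounds[1:]):
--                 simpleSentences.append(sentence[a:b])
--     return simpleSentences
-- ===== Notes on version B (the rewrite author's own statement) =====
-- stated objective: alternative
-- what changed: B replaces A's count-verbs-then-accumulate-with-cut-budget two-pass per sentence by collecting the verb index table in one comprehension and cutting the sentence with slices at the boundary indices verb+1.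
import Mathlib
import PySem

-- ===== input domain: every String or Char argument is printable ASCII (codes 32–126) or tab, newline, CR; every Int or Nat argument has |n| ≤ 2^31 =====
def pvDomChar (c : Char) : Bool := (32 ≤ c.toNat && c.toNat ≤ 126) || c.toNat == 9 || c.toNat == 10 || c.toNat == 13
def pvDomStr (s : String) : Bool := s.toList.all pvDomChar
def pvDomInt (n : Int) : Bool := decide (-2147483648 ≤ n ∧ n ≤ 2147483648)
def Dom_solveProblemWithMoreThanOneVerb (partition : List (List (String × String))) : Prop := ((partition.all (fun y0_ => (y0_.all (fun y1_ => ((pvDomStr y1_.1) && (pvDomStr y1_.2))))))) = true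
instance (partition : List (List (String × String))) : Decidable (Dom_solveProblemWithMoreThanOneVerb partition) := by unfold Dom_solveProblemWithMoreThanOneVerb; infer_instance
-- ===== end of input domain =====

-- B replaces A's count-then-accumulate two-pass cutting loop by collecting the verb indices
-- once and slicing the sentence at index boundaries (objective: alternative decomposition).

-- ===== PORT A =====
def howManyVerbsSentenceContains (sentence : List (String × String)) : Int :=
  sentence.foldl (fun count wp => if wp.2 == "verb" then count + 1 else count) 0

-- sentences[-1].append(x) on a Python list of lists (the list is never empty in A)
def pvAppendLast {α : Type} (xss : List (List α)) (x : α) : List (List α) :=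
  match xss with
  | [] => []
  | [ys] => [ys ++ [x]]
  | ys :: rest => ys :: pvAppendLast rest x

-- the body of A's loop over the sentence, state = (sentences, cuts)
def stepA (verbsCount : Int) (st : List (List (String × String)) × Int)
    (wp : String × String) : List (List (String × String)) × Int :=
  let sentences := pvAppendLast st.1 wp
  if wp.2 == "verb" && decide (st.2 < verbsCount - 1) then (sentences ++ [[]], st.2 + 1)
  else (sentences, st.2)

def cutAfterVerbs (sentence : List (String × String)) (verbsCount : Int) :
    List (List (String × String)) :=
  let st := sentence.foldl (stepA verbsCount) ([[]], 0)
  let sentences := st.1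
  if sentences.getLast? == some ([] : List (String × String)) then sentences.dropLast
  else sentences

-- the body of A's loop over the partition
def outerA (simpleSentences : List (List (String × String)))
    (sentence : List (String × String)) : List (List (String × String)) :=
  let verbsCount := howManyVerbsSentenceContains sentence
  if verbsCount > 1 then simpleSentences ++ cutAfterVerbs sentence verbsCount
  else simpleSentences ++ [sentence]

def solveProblemWithMoreThanOneVerb (partition : List (List (String × String))) :
    List (List (String × String)) :=
  partition.foldl outerA []

-- ===== PORT B =====
-- [i for i, pair in enumerate(sentence) if pair[1] == 'verb']
def pvVerbIndices (sentence : List (String × String)) : List Int :=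
  (PySem.List.enumerate sentence 0).filterMap
    (fun p => if p.2.2 == "verb" then some p.1 else none)

-- the body of B's loop over the partition
def outerB (simpleSentences : List (List (String × String)))
    (sentence : List (String × String)) : List (List (String × String)) :=
  let verbs := pvVerbIndices sentence
  if verbs.length < 2 then simpleSentences ++ [sentence]
  else
    let bounds : List Int :=
      [0] ++ (PySem.List.slice verbs none (some (-1))).map (· + 1)
          ++ [(sentence.length : Int)]
    (bounds.zip (PySem.List.slice bounds (some 1) none)).foldl
      (fun acc p => acc ++ [PySem.List.slice sentence (some p.1) (some p.2)])
      simpleSentences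

def solveProblemWithMoreThanOneVerb_alt (partition : List (List (String × String))) :
    List (List (String × String)) :=
  partition.foldl outerB []

-- ===== PRECONDITION & SPEC =====
def Spec_solveProblemWithMoreThanOneVerb (partition : List (List (String × String))) (out : List (List (String × String))) : Prop := out = solveProblemWithMoreThanOneVerb_alt partition
instance (partition : List (List (String × String))) (out : List (List (String × String))) : Decidable (Spec_solveProblemWithMoreThanOneVerb partition out) := by unfold Spec_solveProblemWithMoreThanOneVerb; infer_instance

-- ===== CLAIM (what is proved, stated in full; the proofs are below) =====
def Claim_equal_solveProblemWithMoreThanOneVerb : Prop := ∀ (partition : List (List (String × String))), Dom_solveProblemWithMoreThanOneVerb partition → Spec_solveProblemWithMoreThanOneVerb partition (solveProblemWithMoreThanOneVerb partition)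

-- ===== LEMMAS AND PROOFS =====

-- number of verbs in a sentence (Nat level)
def countV (s : List (String × String)) : Nat :=
  (s.filter (fun wp => wp.2 == "verb")).length

-- prepend cur to the first block
def mergeFirst (cur : List (String × String)) :
    List (List (String × String)) → List (List (String × String))
  | [] => [cur]
  | xs :: xss => (cur ++ xs) :: xss

-- cut the sentence after each of the first b verbs
def splitSpec : Nat → List (String × String) → List (List (String × String))
  | 0, s => [s]
  | _ + 1, [] => [[]]
  | b + 1, w :: r =>
      if w.2 == "verb" then [w] :: splitSpec b r
      else mergeFirst [w] (splitSpec (b + 1) r)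

-- positions of the verbs (Nat level)
def vidx : List (String × String) → List Nat
  | [] => []
  | w :: r => if w.2 == "verb" then 0 :: (vidx r).map (· + 1) else (vidx r).map (· + 1)

def natBounds (s : List (String × String)) : List Nat :=
  0 :: ((vidx s).dropLast.map (· + 1) ++ [s.length])

def slicesN (s : List (String × String)) : List (List (String × String)) :=
  ((natBounds s).zip (natBounds s).tail).map (fun p => (s.drop p.1).take (p.2 - p.1))

lemma splitSpec_ne_nil (b : Nat) (s : List (String × String)) : splitSpec b s ≠ [] := by
  match b, s with
  | 0, s => simp [splitSpec]
  | b + 1, [] => simp [splitSpec]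
  | b + 1, w :: r =>
    unfold splitSpec
    split
    · simp
    · cases h : splitSpec (b + 1) r with
      | nil => exact absurd h (splitSpec_ne_nil _ _)
      | cons x xs => simp [mergeFirst]

lemma mergeFirst_nil_of_ne_nil {xs : List (List (String × String))} (h : xs ≠ []) :
    mergeFirst [] xs = xs := by
  cases xs with
  | nil => exact absurd rfl h
  | cons x xss => simp [mergeFirst]

lemma mergeFirst_splitSpec_nil (b : Nat) (s : List (String × String)) :
    mergeFirst [] (splitSpec b s) = splitSpec b s :=
  mergeFirst_nil_of_ne_nil (splitSpec_ne_nil b s)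

lemma mergeFirst_mergeFirst (cur w : List (String × String))
    (xs : List (List (String × String))) :
    mergeFirst cur (mergeFirst w xs) = mergeFirst (cur ++ w) xs := by
  cases xs <;> simp [mergeFirst]

lemma splitSpec_cons_not_verb (b : Nat) (w : String × String)
    (r : List (String × String)) (h : (w.2 == "verb") = false) :
    splitSpec b (w :: r) = mergeFirst [w] (splitSpec b r) := by
  cases b with
  | zero => simp [splitSpec, mergeFirst]
  | succ b => simp [splitSpec, h]

lemma countV_cons (w : String × String) (r : List (String × String)) :
    countV (w :: r) = (if w.2 == "verb" then 1 else 0) + countV r := by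
  simp [countV, List.filter_cons]
  split <;> simp <;> omega

lemma howMany_loop (s : List (String × String)) (c : Int) :
    s.foldl (fun count wp => if wp.2 == "verb" then count + 1 else count) c
      = c + (countV s : Int) := by
  induction s generalizing c with
  | nil => simp [countV]
  | cons w r ih =>
    simp only [List.foldl_cons, ih, countV_cons]
    split <;> push_cast <;> ring

lemma howMany_eq (s : List (String × String)) :
    howManyVerbsSentenceContains s = (countV s : Int) := by
  unfold howManyVerbsSentenceContains
  rw [howMany_loop]
  ring

lemma pvAppendLast_snoc {α : Type} (init : List (List α)) (cur : List α) (x : α) :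
    pvAppendLast (init ++ [cur]) x = init ++ [cur ++ [x]] := by
  induction init with
  | nil => rfl
  | cons y ys ih =>
    rcases List.exists_cons_of_ne_nil (by simp : ys ++ [cur] ≠ []) with ⟨z, zs, hz⟩
    rw [List.cons_append, hz]
    show y :: pvAppendLast (z :: zs) x = _
    rw [← hz, ih]
    rfl

lemma loopA (vc : Int) (s : List (String × String)) (init : List (List (String × String)))
    (cur : List (String × String)) (b : Nat) :
    s.foldl (stepA vc) (init ++ [cur], vc - 1 - b) =
      (init ++ mergeFirst cur (splitSpec b s), vc - 1 - ((b - min b (countV s) : Nat) : Int)) := by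
  induction s generalizing init cur b with
  | nil =>
    cases b <;> simp [splitSpec, mergeFirst, countV]
  | cons w r ih =>
    rw [List.foldl_cons]
    by_cases hv : (w.2 == "verb") = true
    · cases b with
      | zero =>
        have hcond : (w.2 == "verb" && decide (vc - 1 - ((0 : Nat) : Int) < vc - 1)) = false := by
          simp
        rw [show stepA vc (init ++ [cur], vc - 1 - ((0:Nat):Int)) w
              = (init ++ [cur ++ [w]], vc - 1 - ((0:Nat):Int)) from by
            simp only [stepA, pvAppendLast_snoc, hcond]; rfl]
        rw [ih init (cur ++ [w]) 0]
        simp [splitSpec, mergeFirst]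
      | succ b' =>
        have hcond : (w.2 == "verb" && decide (vc - 1 - ((b' + 1 : Nat) : Int) < vc - 1)) = true := by
          simp only [hv, Bool.true_and, decide_eq_true_eq]; push_cast; omega
        rw [show stepA vc (init ++ [cur], vc - 1 - ((b' + 1 : Nat) : Int)) w
              = ((init ++ [cur ++ [w]]) ++ [[]], vc - 1 - ((b' : Nat) : Int)) from by
            simp only [stepA, pvAppendLast_snoc, hcond, if_pos, Prod.mk.injEq]
            refine ⟨by simp, by push_cast; ring⟩]
        rw [ih (init ++ [cur ++ [w]]) [] b']
        rw [mergeFirst_splitSpec_nil]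
        simp only [Prod.mk.injEq]
        constructor
        · simp [splitSpec, hv, mergeFirst]
        · congr 1
          rw [countV_cons, if_pos hv]
          push_cast
          omega
    · have hv' : (w.2 == "verb") = false := by simpa using hv
      have hcond : (w.2 == "verb" && decide (vc - 1 - ((b : Nat) : Int) < vc - 1)) = false := by
        simp [hv']
      rw [show stepA vc (init ++ [cur], vc - 1 - ((b : Nat) : Int)) w
            = (init ++ [cur ++ [w]], vc - 1 - ((b : Nat) : Int)) from by
          simp only [stepA, pvAppendLast_snoc, hcond]; rfl]
      rw [ih init (cur ++ [w]) b]
      rw [splitSpec_cons_not_verb b w r hv', mergeFirst_mergeFirst]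
      rw [countV_cons, if_neg (by simp [hv'])]
      simp

lemma countV_pos_ne_nil {s : List (String × String)} (h : 0 < countV s) : s ≠ [] := by
  intro hs; subst hs; simp [countV] at h

lemma splitSpec_getLast_ne_nil (b : Nat) (s : List (String × String)) (h : b < countV s) :
    (splitSpec b s).getLast? ≠ some ([] : List (String × String)) := by
  match b, s with
  | 0, s =>
    simp only [splitSpec, List.getLast?_singleton]
    intro hc
    exact countV_pos_ne_nil h (by simpa using hc)
  | b + 1, [] => simp [countV] at h
  | b + 1, w :: r =>
    unfold splitSpec
    by_cases hv : (w.2 == "verb") = true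
    · rw [if_pos hv]
      have hb : b < countV r := by
        rw [countV_cons, if_pos hv] at h; omega
      cases hs : splitSpec b r with
      | nil => exact absurd hs (splitSpec_ne_nil _ _)
      | cons x xs =>
        rw [List.getLast?_cons_cons]
        rw [← hs]
        exact splitSpec_getLast_ne_nil b r hb
    · have hv' : (w.2 == "verb") = false := by simpa using hv
      rw [if_neg hv]
      have hb : b + 1 < countV r := by
        rw [countV_cons, if_neg (by simp [hv'])] at h; omega
      cases hs : splitSpec (b + 1) r with
      | nil => exact absurd hs (splitSpec_ne_nil _ _)
      | cons x xs =>
        cases xs with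
        | nil => simp [mergeFirst]
        | cons y ys =>
          simp only [mergeFirst, List.getLast?_cons_cons]
          have := splitSpec_getLast_ne_nil (b + 1) r hb
          rw [hs, List.getLast?_cons_cons] at this
          exact this

lemma cutAfterVerbs_eq (s : List (String × String)) (h : 2 ≤ countV s) :
    cutAfterVerbs s ((countV s : Int)) = splitSpec (countV s - 1) s := by
  unfold cutAfterVerbs
  have hinit : (([[]], (0 : Int)) : List (List (String × String)) × Int)
      = ([] ++ [[]], (countV s : Int) - 1 - ((countV s - 1 : Nat) : Int)) := by
    simp only [Prod.mk.injEq]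
    refine ⟨by simp, by push_cast; omega⟩
  rw [hinit, loopA]
  simp only [List.nil_append, mergeFirst_splitSpec_nil]
  have hlast := splitSpec_getLast_ne_nil (countV s - 1) s (by omega)
  rw [if_neg (by simpa using hlast)]

-- ===== B side =====

lemma vidx_length (s : List (String × String)) : (vidx s).length = countV s := by
  induction s with
  | nil => simp [vidx, countV]
  | cons w r ih =>
    rw [countV_cons]
    simp only [vidx]
    split <;> simp [ih] <;> omega

lemma enumerate_filterMap (s : List (String × String)) (k : Int) :
    (PySem.List.enumerate s k).filterMap
        (fun p => if p.2.2 == "verb" then some p.1 else none)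
      = (vidx s).map (fun n : Nat => k + (n : Int)) := by
  induction s generalizing k with
  | nil => simp [PySem.List.enumerate_nil, vidx]
  | cons w r ih =>
    rw [PySem.List.enumerate_cons, List.filterMap_cons]
    simp only [vidx]
    by_cases hv : (w.2 == "verb") = true
    · rw [if_pos hv, if_pos hv, ih]
      simp only [List.map_cons, List.map_map, Function.comp_def]
      refine congrArg₂ _ (by push_cast; ring) ?_
      apply List.map_congr_left; intro n _; push_cast; ring
    · have hv' : (w.2 == "verb") = false := by simpa using hv
      rw [if_neg (by simp [hv']), if_neg (by simp [hv']), ih]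
      simp only [List.map_map, Function.comp_def]
      apply List.map_congr_left; intro n _; push_cast; ring

lemma pvVerbIndices_eq (s : List (String × String)) :
    pvVerbIndices s = (vidx s).map (fun n : Nat => (n : Int)) := by
  unfold pvVerbIndices
  rw [enumerate_filterMap]
  apply List.map_congr_left; intro n _; ring

lemma natBounds_tail_ne_nil (s : List (String × String)) : (natBounds s).tail ≠ [] := by
  simp [natBounds]

-- shifting every bound by one drops the head of the sentence
lemma shift_slices (w : String × String) (r : List (String × String)) (l : List Nat) :
    ((l.map (· + 1)).zip (l.map (· + 1)).tail).map
        (fun p => (((w :: r).drop p.1).take (p.2 - p.1)))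
      = (l.zip l.tail).map (fun p => ((r.drop p.1).take (p.2 - p.1))) := by
  rw [← List.map_tail, List.zip_map, List.map_map]
  apply List.map_congr_left
  rintro ⟨a, b⟩ _
  simp [Nat.add_sub_add_right]

lemma zip_shift_cons (a : Nat) (l' : List Nat) :
    (0 :: ((a :: l').map (· + 1))).zip ((0 :: ((a :: l').map (· + 1))).tail)
      = ((0 : Nat), a + 1) ::
        (((a :: l').map (· + 1)).zip (((a :: l').map (· + 1)).tail)) := rfl

lemma natBounds_cons_verb (w : String × String) (r : List (String × String))
    (hv : (w.2 == "verb") = true) (hne : vidx r ≠ []) :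
    natBounds (w :: r) = 0 :: (natBounds r).map (· + 1) := by
  have hvx : vidx (w :: r) = 0 :: (vidx r).map (· + 1) := by simp [vidx, hv]
  unfold natBounds
  rw [hvx, List.dropLast_cons_of_ne_nil (by simpa using hne)]
  simp [← List.map_dropLast, Function.comp_def]

lemma natBounds_cons_not_verb (w : String × String) (r : List (String × String))
    (hv : (w.2 == "verb") = false) :
    natBounds (w :: r) = 0 :: ((natBounds r).tail.map (· + 1)) := by
  have hvx : vidx (w :: r) = (vidx r).map (· + 1) := by simp [vidx, hv]
  simp only [natBounds, hvx, ← List.map_dropLast, List.map_map, List.map_cons,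
    List.map_append, List.map_nil, Function.comp_def, List.length_cons, List.tail_cons]

-- key B lemma: the slices at the verb boundaries are exactly splitSpec
lemma slicesN_eq (s : List (String × String)) : slicesN s = splitSpec (countV s - 1) s := by
  induction s with
  | nil => simp [slicesN, natBounds, vidx, countV, splitSpec]
  | cons w r ih =>
    by_cases hv : (w.2 == "verb") = true
    · cases hvr : vidx r with
      | nil =>
        have hcr : countV r = 0 := by
          have := vidx_length r; rw [hvr] at this; simpa using this.symm
        simp [slicesN, natBounds, vidx, hv, hvr, countV_cons, hcr, splitSpec]
      | cons v vs =>
        have hcr : 0 < countV r := by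
          have := vidx_length r; rw [hvr] at this; simp at this; omega
        have hNBr : natBounds r = 0 :: ((vidx r).dropLast.map (· + 1) ++ [r.length]) := rfl
        unfold slicesN
        rw [natBounds_cons_verb w r hv (by rw [hvr]; simp), hNBr,
          zip_shift_cons 0 ((vidx r).dropLast.map (· + 1) ++ [r.length]), List.map_cons,
          shift_slices w r (0 :: ((vidx r).dropLast.map (· + 1) ++ [r.length])), ← hNBr]
        have hfold : ((natBounds r).zip (natBounds r).tail).map
            (fun p => ((r.drop p.1).take (p.2 - p.1))) = slicesN r := rfl
        rw [hfold, ih]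
        have hc : countV (w :: r) - 1 = (countV r - 1) + 1 := by
          rw [countV_cons, if_pos hv]; omega
        rw [hc]
        simp [splitSpec, hv]
    · have hv' : (w.2 == "verb") = false := by simpa using hv
      obtain ⟨t, T', hTc⟩ : ∃ t T', (natBounds r).tail = t :: T' := by
        cases h : (natBounds r).tail with
        | nil => exact absurd h (natBounds_tail_ne_nil r)
        | cons a l => exact ⟨a, l, rfl⟩
      unfold slicesN
      rw [natBounds_cons_not_verb w r hv', hTc, zip_shift_cons t T', List.map_cons,
        shift_slices w r (t :: T')]
      have hsr : slicesN r = (r.take t) :: ((t :: T').zip (t :: T').tail).map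
          (fun p => ((r.drop p.1).take (p.2 - p.1))) := by
        unfold slicesN
        rw [show natBounds r = 0 :: (natBounds r).tail from rfl, hTc]
        simp [List.zip_cons_cons]
      have hcv : countV (w :: r) = countV r := by
        rw [countV_cons, if_neg (by simp [hv'])]
        omega
      rw [hcv, splitSpec_cons_not_verb _ w r hv', ← ih, hsr]
      simp [mergeFirst, List.take_succ_cons]

-- ===== glue: the per-sentence value of port B =====

lemma foldl_append_singleton {A B : Type} (l : List A) (f : A -> B) (acc : List B) :
    l.foldl (fun a x => a ++ [f x]) acc = acc ++ l.map f := by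
  induction l generalizing acc with
  | nil => simp
  | cons x xs ih => simp [ih]

lemma bounds_eq (s : List (String × String)) :
    ([(0 : Int)] ++ (PySem.List.slice (pvVerbIndices s) none (some (-1))).map (· + 1)
        ++ [(s.length : Int)])
      = (natBounds s).map (fun n : Nat => (n : Int)) := by
  rw [pvVerbIndices_eq, PySem.List.slice_to_neg_one, ← List.map_dropLast]
  simp only [natBounds, List.map_cons, List.map_append, List.map_map, List.map_nil,
    Function.comp_def]
  simp

lemma slices_map_cast (s : List (String × String)) (l : List Nat) :
    ((l.map (fun n : Nat => (n : Int))).zip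
        ((l.map (fun n : Nat => (n : Int))).tail)).map
      (fun p : Int × Int => PySem.List.slice s (some p.1) (some p.2))
      = (l.zip l.tail).map (fun p => ((s.drop p.1).take (p.2 - p.1))) := by
  rw [← List.map_tail, List.zip_map, List.map_map]
  apply List.map_congr_left
  rintro ⟨a, b⟩ _
  simp only [Prod.map, Function.comp_apply]
  exact PySem.List.slice_natCast s a b

lemma vlen_eq (s : List (String × String)) : (pvVerbIndices s).length = countV s := by
  rw [pvVerbIndices_eq, List.length_map, vidx_length]

-- per-sentence agreement of the two loop bodies
lemma step_eq (acc : List (List (String × String))) (s : List (String × String)) :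
    outerA acc s = outerB acc s := by
  unfold outerA outerB
  show (if howManyVerbsSentenceContains s > 1
      then acc ++ cutAfterVerbs s (howManyVerbsSentenceContains s)
      else acc ++ [s])
    = (if (pvVerbIndices s).length < 2 then acc ++ [s]
      else (([(0 : Int)] ++ (PySem.List.slice (pvVerbIndices s) none (some (-1))).map (· + 1)
            ++ [(s.length : Int)]).zip
          (PySem.List.slice
            ([(0 : Int)] ++ (PySem.List.slice (pvVerbIndices s) none (some (-1))).map (· + 1)
              ++ [(s.length : Int)]) (some 1) none)).foldl
        (fun (acc : List (List (String × String))) (p : Int × Int) => acc ++ [PySem.List.slice s (some p.1) (some p.2)]) acc)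
  rw [howMany_eq, vlen_eq, bounds_eq, PySem.List.slice_from_one]
  rw [foldl_append_singleton _
    (fun p : Int × Int => PySem.List.slice s (some p.1) (some p.2)) acc]
  rw [slices_map_cast s (natBounds s)]
  have hfold : ((natBounds s).zip (natBounds s).tail).map
      (fun p => ((s.drop p.1).take (p.2 - p.1))) = slicesN s := rfl
  rw [hfold]
  by_cases h : 2 ≤ countV s
  · rw [if_pos (by push_cast; omega), if_neg (by omega)]
    rw [cutAfterVerbs_eq s h, slicesN_eq]
  · rw [if_neg (by push_cast; omega), if_pos (by omega)]

lemma main_loop (partition : List (List (String × String)))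
    (acc : List (List (String × String))) :
    partition.foldl outerA acc = partition.foldl outerB acc := by
  induction partition generalizing acc with
  | nil => rfl
  | cons s part ih =>
    rw [List.foldl_cons, List.foldl_cons, step_eq acc s]
    exact ih _

-- ===== VERDICT (by name: the statement is the Claim_ definition above) =====
theorem solveProblemWithMoreThanOneVerb_spec : Claim_equal_solveProblemWithMoreThanOneVerb := by
  intro partition _
  unfold Spec_solveProblemWithMoreThanOneVerb
  unfold solveProblemWithMoreThanOneVerb solveProblemWithMoreThanOneVerb_alt
  exact main_loop partition []
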